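-- pv_equiv track=rewrite | github.com/Harshad725250/Zero_Trust_Multi_Cloud_Framework | evaluate_metrics.py | calculate_arm_metrics
-- ===== SOURCE A (Python) =====
-- def calculate_arm_metrics(arm_data):
--     total = len(arm_data)
--     deny = sum(1 for a in arm_data if a["decision"] == "DENY")
--     review = sum(1 for a in arm_data if a["decision"] == "REVIEW")
--     clouds = set(a["cloud"] for a in arm_data if "cloud" in a)
--     return {
--         "Total Remediations": total,
--         "Deny Remediations": deny,
--         "Review Remediations": review,
--         "Clouds Covered": len(clouds)
--     }
-- ===== SOURCE B (Python) =====
-- def calculate_arm_metrics(arm_data):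
--     total = 0
--     deny = 0
--     review = 0
--     clouds = set()
--     for a in arm_data:
--         total += 1
--         d = a["decision"]
--         if d == "DENY":
--             deny += 1
--         elif d == "REVIEW":
--             review += 1
--         if "cloud" in a:
--             clouds.add(a["cloud"])
--     return {
--         "Total Remediations": total,
--         "Deny Remediations": deny,
--         "Review Remediations": review,
--         "Clouds Covered": len(clouds),
--     }
-- ===== Notes on version B (the rewrite author's own statement) =====
-- stated objective: alternative
-- what changed: Replaces A's four separate scans (len, two generator-sum passes, a set comprehension) by one explicit loop maintaining total/deny/review counters and the cloud set together.
import Mathlib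
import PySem

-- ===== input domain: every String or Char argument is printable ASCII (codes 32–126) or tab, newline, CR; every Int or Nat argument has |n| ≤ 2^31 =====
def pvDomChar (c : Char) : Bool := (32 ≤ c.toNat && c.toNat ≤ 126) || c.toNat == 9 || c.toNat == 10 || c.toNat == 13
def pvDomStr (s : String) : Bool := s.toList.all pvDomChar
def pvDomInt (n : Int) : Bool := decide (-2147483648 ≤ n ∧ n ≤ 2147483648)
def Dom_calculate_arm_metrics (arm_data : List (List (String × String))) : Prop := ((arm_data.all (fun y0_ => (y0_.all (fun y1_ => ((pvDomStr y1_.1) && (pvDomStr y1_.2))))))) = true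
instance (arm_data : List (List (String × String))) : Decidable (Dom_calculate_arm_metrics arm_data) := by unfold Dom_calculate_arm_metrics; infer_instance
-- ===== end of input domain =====

-- B replaces A's four separate scans by one loop maintaining all four accumulators; same results.


-- dict access a[k] / 'k in a' primitive shared as the dict-lookup convention (first match)
def dget (a : List (String × String)) (k : String) : Option String := (PySem.Dict.mk a).get? k

-- ===== PORT A =====
def calculate_arm_metrics (arm_data : List (List (String × String))) : List (String × Int) :=
  let total : Int := arm_data.length
  -- sum(1 for a in arm_data if a["decision"] == "DENY"); a["decision"] raising (missing key) is excluded by Pre_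
  let deny : Int := arm_data.foldl (fun s a => if dget a "decision" == some "DENY" then s + 1 else s) 0
  let review : Int := arm_data.foldl (fun s a => if dget a "decision" == some "REVIEW" then s + 1 else s) 0
  -- set(a["cloud"] for a in arm_data if "cloud" in a)
  let clouds : PySem.Set String :=
    PySem.Set.ofList ((arm_data.filter (fun a => (dget a "cloud").isSome)).map (fun a => (dget a "cloud").getD ""))
  [("Total Remediations", total), ("Deny Remediations", deny),
   ("Review Remediations", review), ("Clouds Covered", (clouds.length : Int))]

-- ===== PORT B =====
-- loop body of Source B: state (total, deny, review, clouds); d = a["decision"] total via getD "" (missing key excluded by Pre_)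
def altStep (st : Int × Int × Int × PySem.Set String) (a : List (String × String)) :
    Int × Int × Int × PySem.Set String :=
  let total := st.1 + 1
  let d := (dget a "decision").getD ""
  let deny := if d == "DENY" then st.2.1 + 1 else st.2.1
  let review := if d == "DENY" then st.2.2.1 else if d == "REVIEW" then st.2.2.1 + 1 else st.2.2.1
  let clouds := match dget a "cloud" with
    | some v => PySem.Set.add st.2.2.2 v
    | none => st.2.2.2
  (total, deny, review, clouds)

def calculate_arm_metrics_alt (arm_data : List (List (String × String))) : List (String × Int) :=
  let st := arm_data.foldl altStep (0, 0, 0, PySem.Set.empty)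
  [("Total Remediations", st.1), ("Deny Remediations", st.2.1),
   ("Review Remediations", st.2.2.1), ("Clouds Covered", (st.2.2.2.length : Int))]

-- ===== PRECONDITION & SPEC =====
-- Pre_ excludes exactly the inputs where a["decision"] raises KeyError (in both A and B): some element lacks the "decision" key.
def Pre_calculate_arm_metrics (arm_data : List (List (String × String))) : Prop :=
  arm_data.all (fun a => (PySem.Dict.mk a).contains "decision") = true
instance (arm_data : List (List (String × String))) : Decidable (Pre_calculate_arm_metrics arm_data) := by
  unfold Pre_calculate_arm_metrics; infer_instance
def pvWitness_calculate_arm_metrics : (List (List (String × String))) :=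
  [[("decision", "DENY"), ("cloud", "aws")], [("decision", "ALLOW")]]

def Spec_calculate_arm_metrics (arm_data : List (List (String × String))) (out : List (String × Int)) : Prop := out = calculate_arm_metrics_alt arm_data
instance (arm_data : List (List (String × String))) (out : List (String × Int)) : Decidable (Spec_calculate_arm_metrics arm_data out) := by unfold Spec_calculate_arm_metrics; infer_instance

-- ===== CLAIM (what is proved, stated in full; the proofs are below) =====
def Claim_equal_calculate_arm_metrics : Prop := ∀ (arm_data : List (List (String × String))), Dom_calculate_arm_metrics arm_data → Pre_calculate_arm_metrics arm_data → Spec_calculate_arm_metrics arm_data (calculate_arm_metrics arm_data)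

-- ===== LEMMAS AND PROOFS =====

-- B's single fold splits into the four independent accumulations
theorem foldl_altStep (xs : List (List (String × String))) :
    ∀ (t d r : Int) (c : PySem.Set String),
    xs.foldl altStep (t, d, r, c) =
      (t + xs.length,
       xs.foldl (fun s a => if dget a "decision" == some "DENY" then s + 1 else s) d,
       xs.foldl (fun s a => if dget a "decision" == some "REVIEW" then s + 1 else s) r,
       xs.foldl (fun c a => match dget a "cloud" with
                  | some v => PySem.Set.add c v
                  | none => c) c) := by
  induction xs with
  | nil => intro t d r c; simp
  | cons a xs ih =>
    intro t d r c
    have hstep : altStep (t, d, r, c) a =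
        (t + 1,
         if dget a "decision" == some "DENY" then d + 1 else d,
         if dget a "decision" == some "REVIEW" then r + 1 else r,
         match dget a "cloud" with
         | some v => PySem.Set.add c v
         | none => c) := by
      unfold altStep
      rcases h : dget a "decision" with _ | v
      · simp
      · simp only [Option.getD_some]
        by_cases hv : v = "DENY"
        · subst hv; simp
        · by_cases hr : v = "REVIEW"
          · subst hr; simp
          · simp [hv, hr]
    simp only [List.foldl_cons, hstep, ih]
    congr 1
    simp only [List.length_cons]; push_cast; ring

-- B's cloud accumulation over the list equals a foldl of Set.add over A's mapped filtered list
theorem cloudsFold (xs : List (List (String × String))) :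
    ∀ (c : PySem.Set String),
    xs.foldl (fun c a => match dget a "cloud" with
               | some v => PySem.Set.add c v
               | none => c) c =
    ((xs.filter (fun a => (dget a "cloud").isSome)).map (fun a => (dget a "cloud").getD "")).foldl
      PySem.Set.add c := by
  induction xs with
  | nil => intro c; rfl
  | cons a xs ih =>
    intro c
    rcases h : dget a "cloud" with _ | v
    · simp [h, ih]
    · simp [h, ih]

-- ===== VERDICT (by name: the statement is the Claim_ definition above) =====
theorem calculate_arm_metrics_spec : Claim_equal_calculate_arm_metrics := by
  intro arm_data _ _
  unfold Spec_calculate_arm_metrics calculate_arm_metrics calculate_arm_metrics_alt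
  rw [foldl_altStep, cloudsFold]
  simp [PySem.Set.ofList_eq_foldl, PySem.Set.empty]
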